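-- pv_equiv track=rewrite | github.com/uhh-lt/subtitle2go | nnet3-recognizer.py | array_to_squences
-- ===== SOURCE A (Python) =====
-- import math
--
-- def array_to_squences(vtt): # Alte Sequenztrennung nach 10 Wörtern
--     len_array = math.ceil(len(vtt) / 10)
--     sequences = [["" for x in range(3)] for y in range(len_array)]
--     wcounter = 0
--     scounter = 0
--     for a in vtt:
--         if wcounter < 10:
--             if wcounter == 0: # erstes Wort in der Sequenz
--                 sequences[scounter][1] = a[1] # Setzt Anfangstiming der Sequenz
--                 sequences[scounter][0] = a[0]
--             else:
--                 sequences[scounter][0] = sequences[scounter][0] + " " + a[0]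
--             wcounter += 1
--             sequences[scounter][2] = a[1] + a[2] # Setzt Endtiming der Sequenz
--         else:
--             wcounter = 1
--             scounter += 1
--             sequences[scounter][0] = a[0]
--             sequences[scounter][1] = a[1]
--             sequences[scounter][2] = a[1] + a[2]
--     return sequences
-- ===== SOURCE B (Python) =====
-- def array_to_squences(vtt):  # group words into sequences of ten, chunk by chunk
--     sequences = []
--     for i in range(0, len(vtt), 10):
--         chunk = vtt[i:i + 10]
--         sequences.append([" ".join(w[0] for w in chunk),
--                           chunk[0][1],
--                           chunk[-1][1] + chunk[-1][2]])
--     return sequences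
-- ===== Notes on version B (the rewrite author's own statement) =====
-- stated objective: simpler
-- what changed: Replaces the preallocated array plus two-counter word loop with per-word first/subsequent/new-sequence branches by a single chunk-level loop over 10-word slices, building each sequence row directly from the chunk (join of words, first start, last end).
import Mathlib
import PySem

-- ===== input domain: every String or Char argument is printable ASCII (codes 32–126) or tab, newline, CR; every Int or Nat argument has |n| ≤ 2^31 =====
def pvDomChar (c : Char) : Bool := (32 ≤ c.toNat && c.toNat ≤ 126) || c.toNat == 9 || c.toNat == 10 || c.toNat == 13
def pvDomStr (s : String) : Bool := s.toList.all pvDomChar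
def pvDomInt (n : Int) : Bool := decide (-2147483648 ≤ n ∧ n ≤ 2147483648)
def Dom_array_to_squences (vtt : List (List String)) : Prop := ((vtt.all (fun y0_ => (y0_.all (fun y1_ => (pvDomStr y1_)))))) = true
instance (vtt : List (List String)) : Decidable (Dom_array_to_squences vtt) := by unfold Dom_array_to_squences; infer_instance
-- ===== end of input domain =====

-- B replaces A's preallocated array and two-counter word loop by a simpler chunk-of-ten loop (objective: simpler).

-- ===== PORT A =====
-- sequences[i][j] = v  (indices are always in range during A's run; List.set matches Python there)
def pvSet2 (seqs : List (List String)) (i j : Nat) (v : String) : List (List String) :=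
  seqs.set i ((seqs.getD i []).set j v)

-- the body of A's `for a in vtt` loop; state = (sequences, wcounter, scounter)
def pvStepA (st : List (List String) × Nat × Nat) (a : List String) : List (List String) × Nat × Nat :=
  let seqs := st.1
  let w := st.2.1
  let s := st.2.2
  if w < 10 then
    let seqs :=
      if w = 0 then
        -- sequences[scounter][1] = a[1]; sequences[scounter][0] = a[0]
        pvSet2 (pvSet2 seqs s 1 (PySem.List.pyGetD a 1 "")) s 0 (PySem.List.pyGetD a 0 "")
      else
        -- sequences[scounter][0] = sequences[scounter][0] + " " + a[0]
        pvSet2 seqs s 0 ((PySem.List.pyGetD (PySem.List.pyGetD seqs (s : Int) []) 0 "") ++ " " ++ PySem.List.pyGetD a 0 "")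
    -- wcounter += 1; sequences[scounter][2] = a[1] + a[2]
    (pvSet2 seqs s 2 (PySem.List.pyGetD a 1 "" ++ PySem.List.pyGetD a 2 ""), w + 1, s)
  else
    -- wcounter = 1; scounter += 1; then the three assignments
    let s := s + 1
    let seqs := pvSet2 seqs s 0 (PySem.List.pyGetD a 0 "")
    let seqs := pvSet2 seqs s 1 (PySem.List.pyGetD a 1 "")
    let seqs := pvSet2 seqs s 2 (PySem.List.pyGetD a 1 "" ++ PySem.List.pyGetD a 2 "")
    (seqs, 1, s)

def array_to_squences (vtt : List (List String)) : List (List String) :=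
  -- math.ceil(len(vtt)/10): exact as Nat ceiling division here
  let len_array : Nat := (vtt.length + 9) / 10
  -- [["" for x in range(3)] for y in range(len_array)]
  let sequences : List (List String) :=
    (PySem.List.pyRange 0 (len_array : Int) 1).map (fun _ => (PySem.List.pyRange 0 3 1).map (fun _ => ""))
  (vtt.foldl pvStepA (sequences, 0, 0)).1

-- ===== PORT B =====
-- [" ".join(w[0] for w in chunk), chunk[0][1], chunk[-1][1] + chunk[-1][2]]
def pvMkSeq (chunk : List (List String)) : List String :=
  [PySem.Str.join " " (chunk.map (fun w => PySem.List.pyGetD w 0 "")),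
   PySem.List.pyGetD (PySem.List.pyGetD chunk 0 []) 1 "",
   PySem.List.pyGetD (PySem.List.pyGetD chunk (-1) []) 1 ""
     ++ PySem.List.pyGetD (PySem.List.pyGetD chunk (-1) []) 2 ""]

-- for i in range(0, len(vtt), 10): chunk = vtt[i:i+10]; … — ported as recursion over the 10-element slices
def pvChunks : List (List String) → List (List String)
  | [] => []
  | x :: xs =>
    pvMkSeq (PySem.List.slice (x :: xs) (some 0) (some 10))
      :: pvChunks (PySem.List.slice (x :: xs) (some 10) none)
termination_by l => l.length
decreasing_by
  rw [PySem.List.slice_from _ (by omega : (0:Int) ≤ 10)]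
  simp

def array_to_squences_alt (vtt : List (List String)) : List (List String) :=
  pvChunks vtt

-- ===== PRECONDITION & SPEC =====
-- Pre_ excludes exactly the inputs on which the Python A raises IndexError: a word entry with fewer than 3 fields.
def Pre_array_to_squences (vtt : List (List String)) : Prop := ∀ a ∈ vtt, 3 ≤ a.length
instance (vtt : List (List String)) : Decidable (Pre_array_to_squences vtt) := by unfold Pre_array_to_squences; infer_instance
def pvWitness_array_to_squences : List (List String) :=
  [["hello", "00:01", "2"], ["world", "00:03", "2"], ["x", "00:05", "1"]]

def Spec_array_to_squences (vtt : List (List String)) (out : List (List String)) : Prop := out = array_to_squences_alt vtt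
instance (vtt : List (List String)) (out : List (List String)) : Decidable (Spec_array_to_squences vtt out) := by unfold Spec_array_to_squences; infer_instance

-- ===== CLAIM (what is proved, stated in full; the proofs are below) =====
def Claim_equal_array_to_squences : Prop := ∀ (vtt : List (List String)), Dom_array_to_squences vtt → Pre_array_to_squences vtt → Spec_array_to_squences vtt (array_to_squences vtt)

-- ===== LEMMAS AND PROOFS =====

-- the blank row and the triple-folding abstractions used to characterise A's loop
def pvBlank : List String := ["", "", ""]

def pvRow (e : String × String × String) : List String := [e.1, e.2.1, e.2.2]

def pvExt (e : String × String × String) (y : List String) : String × String × String :=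
  (e.1 ++ " " ++ PySem.List.pyGetD y 0 "", e.2.1,
   PySem.List.pyGetD y 1 "" ++ PySem.List.pyGetD y 2 "")

def pvNew (y : List String) : String × String × String :=
  (PySem.List.pyGetD y 0 "", PySem.List.pyGetD y 1 "",
   PySem.List.pyGetD y 1 "" ++ PySem.List.pyGetD y 2 "")

def pvFoldExt (e : String × String × String) (c : List (List String)) : String × String × String :=
  c.foldl pvExt e

-- list surgery at position pre.length
theorem pvSet2_at (pre : List (List String)) (e : List String) (suf : List (List String)) (j : Nat) (v : String) :
    pvSet2 (pre ++ e :: suf) pre.length j v = pre ++ (e.set j v) :: suf := by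
  simp [pvSet2]

theorem pvSet2_at1 (pre : List (List String)) (a b : List String) (suf : List (List String)) (j : Nat) (v : String) :
    pvSet2 (pre ++ a :: b :: suf) (pre.length + 1) j v = pre ++ a :: (b.set j v) :: suf := by
  simpa using pvSet2_at (pre ++ [a]) b suf j v

theorem pv_step_first (suf : List (List String)) (y : List String) :
    pvStepA (pvBlank :: suf, 0, 0) y = (pvRow (pvNew y) :: suf, 1, 0) := by
  simp [pvStepA, pvSet2, pvBlank, pvRow, pvNew, List.set]

theorem pv_step_mid (pre suf : List (List String)) (e : String × String × String) (y : List String)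
    (w : Nat) (h1 : 1 ≤ w) (h2 : w < 10) :
    pvStepA (pre ++ pvRow e :: suf, w, pre.length) y = (pre ++ pvRow (pvExt e y) :: suf, w + 1, pre.length) := by
  have hw : ¬ w = 0 := by omega
  simp [pvStepA, h2, hw, pvSet2_at, pvRow, pvExt, List.set]

theorem pv_step_new (pre suf : List (List String)) (e : String × String × String) (y : List String) :
    pvStepA (pre ++ pvRow e :: pvBlank :: suf, 10, pre.length) y
      = (pre ++ pvRow e :: pvRow (pvNew y) :: suf, 1, pre.length + 1) := by
  simp [pvStepA, pvSet2_at1, pvBlank, pvRow, pvNew, List.set]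

-- pvChunks in take/drop form
theorem pvChunks_cons (x : List String) (xs : List (List String)) :
    pvChunks (x :: xs) = pvMkSeq ((x :: xs).take 10) :: pvChunks ((x :: xs).drop 10) := by
  rw [pvChunks, PySem.List.slice_zero_start, PySem.List.slice_to _ (by omega : (0:Int) ≤ 10),
    PySem.List.slice_from _ (by omega : (0:Int) ≤ 10)]
  rfl

theorem pvChunks_length (l : List (List String)) : (pvChunks l).length = (l.length + 9) / 10 := by
  induction l using pvChunks.induct with
  | case1 => simp [pvChunks]
  | case2 x xs ih =>
    rw [PySem.List.slice_from _ (by omega : (0:Int) ≤ 10)] at ih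
    have ih' : (pvChunks (List.drop 10 (x :: xs))).length = ((x :: xs).length - 10 + 9) / 10 := by
      simpa using ih
    rw [pvChunks_cons, List.length_cons, ih']
    simp only [List.length_cons]
    omega

-- components of pvFoldExt
theorem pvFoldExt_fst (c : List (List String)) (e : String × String × String) :
    (pvFoldExt e c).1 = List.foldl (fun a b => a ++ " " ++ b) e.1 (c.map (fun w => PySem.List.pyGetD w 0 "")) := by
  induction c generalizing e with
  | nil => rfl
  | cons z t ih => simpa [pvFoldExt, pvExt] using ih (pvExt e z)

theorem pvFoldExt_snd (c : List (List String)) (e : String × String × String) :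
    (pvFoldExt e c).2.1 = e.2.1 := by
  induction c generalizing e with
  | nil => rfl
  | cons z t ih => simpa [pvFoldExt, pvExt] using ih (pvExt e z)

theorem pvFoldExt_cons (e : String × String × String) (z : List String) (t : List (List String)) :
    pvFoldExt e (z :: t) = pvFoldExt (pvExt e z) t := rfl

theorem pvFoldExt_thd (c : List (List String)) (e : String × String × String) :
    (pvFoldExt e c).2.2
      = (c.map (fun w => PySem.List.pyGetD w 1 "" ++ PySem.List.pyGetD w 2 "")).getLastD e.2.2 := by
  induction c generalizing e with
  | nil => rfl
  | cons z t ih => rw [pvFoldExt_cons, ih, List.map_cons, List.getLastD_cons]; rfl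

theorem pv_chars_shift (s p q : List Char) (rest : List (List Char)) :
    PySem.Chars.join s ((p ++ s ++ q) :: rest) = p ++ s ++ PySem.Chars.join s (q :: rest) := by
  cases rest with
  | nil => simp [PySem.Chars.join_singleton]
  | cons z t => simp [PySem.Chars.join_cons_cons]

theorem pv_join_foldl (x : String) (xs : List String) :
    PySem.Str.join " " (x :: xs) = List.foldl (fun a b => a ++ " " ++ b) x xs := by
  induction xs generalizing x with
  | nil => simp [PySem.Str.join, PySem.Chars.join_singleton]
  | cons y ys ih =>
    rw [List.foldl_cons, ← ih (x ++ " " ++ y)]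
    simp only [PySem.Str.join, List.map_cons]
    rw [show (x ++ " " ++ y).toList = x.toList ++ " ".toList ++ y.toList by simp,
      pv_chars_shift, PySem.Chars.join_cons_cons]

theorem pv_getLastD_map (f : List String → String) (c : List (List String)) (y : List String) :
    (c.map f).getLastD (f y) = f (c.getLastD y) := by
  induction c generalizing y with
  | nil => rfl
  | cons z t ih => rw [List.map_cons, List.getLastD_cons, List.getLastD_cons, ih]

theorem pv_row_mk (y : List String) (c : List (List String)) :
    pvRow (pvFoldExt (pvNew y) c) = pvMkSeq (y :: c) := by
  have hne : (y :: c) ≠ ([] : List (List String)) := by simp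
  simp only [pvRow, pvFoldExt_fst, pvFoldExt_snd, pvFoldExt_thd, ← pv_join_foldl]
  simp only [pvMkSeq, PySem.List.pyGetD_neg_one _ _ hne, PySem.List.pyGetD_zero_cons,
    List.getLast_eq_getLastD, List.map_cons]
  rw [show (pvNew y).2.2 = (fun w => PySem.List.pyGetD w 1 "" ++ PySem.List.pyGetD w 2 "") y from rfl,
    pv_getLastD_map (fun w => PySem.List.pyGetD w 1 "" ++ PySem.List.pyGetD w 2 "") c y]
  rfl

-- the main loop invariant: from a partially filled current row, A's fold produces the finished row followed by B's chunks
theorem pv_loopA (ys : List (List String)) (w : Nat) (h1 : 1 ≤ w) (h2 : w ≤ 10)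
    (pre : List (List String)) (e : String × String × String) :
    (List.foldl pvStepA
        (pre ++ pvRow e :: List.replicate (pvChunks (ys.drop (10 - w))).length pvBlank, w, pre.length) ys).1
      = pre ++ pvRow (pvFoldExt e (ys.take (10 - w))) :: pvChunks (ys.drop (10 - w)) := by
  induction ys generalizing w pre e with
  | nil => simp [pvFoldExt, pvChunks]
  | cons y t ih =>
    by_cases hw : w < 10
    · have h10 : 10 - w = (10 - (w + 1)) + 1 := by omega
      rw [h10, List.take_succ_cons, List.drop_succ_cons, List.foldl_cons,
        pv_step_mid pre _ e y w h1 hw, pvFoldExt_cons]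
      exact ih (w + 1) (by omega) (by omega) pre (pvExt e y)
    · have hw10 : w = 10 := by omega
      subst hw10
      simp only [Nat.sub_self, List.take_zero, List.drop_zero]
      rw [pvChunks_cons, List.length_cons, List.replicate_succ, List.foldl_cons,
        pv_step_new pre _ e y]
      have hdrop : (y :: t).drop 10 = t.drop 9 := rfl
      have htake : (y :: t).take 10 = y :: t.take 9 := rfl
      rw [hdrop, htake]
      have hih := ih 1 (by omega) (by omega) (pre ++ [pvRow e]) (pvNew y)
      simp only [List.append_assoc, List.cons_append, List.nil_append, List.length_append,
        List.length_cons, List.length_nil, show (10:Nat) - 1 = 9 from rfl] at hih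
      rw [hih, pv_row_mk]
      simp [pvFoldExt]

-- ===== VERDICT (by name: the statement is the Claim_ definition above) =====
theorem pv_init_replicate (m : Nat) :
    (PySem.List.pyRange 0 (m : Int) 1).map (fun _ => (PySem.List.pyRange 0 3 1).map (fun _ => ("" : String)))
      = List.replicate m pvBlank := by
  rw [PySem.List.pyRange_zero_natCast]
  have hrow : (PySem.List.pyRange 0 3 1).map (fun _ => ("" : String)) = pvBlank := by decide
  simp [hrow, List.eq_replicate_iff]

theorem array_to_squences_spec : Claim_equal_array_to_squences := by
  unfold Claim_equal_array_to_squences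
  intro vtt _ _
  unfold Spec_array_to_squences array_to_squences array_to_squences_alt
  cases vtt with
  | nil =>
    simp only [pv_init_replicate]
    norm_num [pvChunks]
  | cons a t =>
    simp only [pv_init_replicate]
    have hlen : ((a :: t).length + 9) / 10 = (pvChunks (t.drop 9)).length + 1 := by
      rw [pvChunks_length]
      simp only [List.length_cons, List.length_drop]
      omega
    rw [hlen, List.replicate_succ, List.foldl_cons, pv_step_first]
    have hmain := pv_loopA t 1 (by omega) (by omega) [] (pvNew a)
    simp only [List.nil_append, List.length_nil, show (10:Nat) - 1 = 9 from rfl] at hmain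
    rw [hmain, pv_row_mk, pvChunks_cons,
      show (a :: t).take 10 = a :: t.take 9 from rfl,
      show (a :: t).drop 10 = t.drop 9 from rfl]
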